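-- pv_equiv track=rewrite | github.com/heuer/segno | segno/encoder.py | score_n1
-- ===== SOURCE A (Python) =====
-- def score_n1(matrix, matrix_size):
--     """\
--     Implements the penalty score feature 1.
--
--     ISO/IEC 18004:2015(E) -- 7.8.3 Evaluation of data masking results - Table 11 (page 54)
--
--     ============================================   ========================    ======
--     Feature                                        Evaluation condition        Points
--     ============================================   ========================    ======
--     Adjacent modules in row/column in same color   No. of modules = (5 + i)    N1 + i
--     ============================================   ========================    ======
--
--     N1 = 3
--
--     :param matrix: The matrix to evaluate
--     :param matrix_size: The width (or height) of the matrix.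
--     :return int: The penalty score (feature 1) of the matrix.
--     """
--     score = 0
--     for i in range(matrix_size):
--         prev_bit_row, prev_bit_col = -1, -1
--         row_counter, col_counter = 0, 0
--         for j in range(matrix_size):
--             # Row-wise
--             bit = matrix[i][j]
--             if bit == prev_bit_row:
--                 row_counter += 1
--             else:
--                 if row_counter >= 5:
--                     score += row_counter - 2  # N1 == 3
--                 row_counter = 1
--                 prev_bit_row = bit
--             # Col-wise
--             bit = matrix[j][i]
--             if bit == prev_bit_col:
--                 col_counter += 1
--             else:
--                 if col_counter >= 5:
--                     score += col_counter - 2  # N1 == 3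
--                 col_counter = 1
--                 prev_bit_col = bit
--         if row_counter >= 5:
--             score += row_counter - 2  # N1 == 3
--         if col_counter >= 5:
--             score += col_counter - 2  # N1 == 3
--     return score
-- ===== SOURCE B (Python) =====
-- def score_n1(matrix, matrix_size):
--     n = matrix_size
--
--     def window_penalty(line):
--         # Count every length-5 window of equal modules (1 point each), plus 2 extra
--         # for a window that starts a run: a run of length L >= 5 has L-4 windows,
--         # exactly one of them run-starting, giving (L-4) + 2 = L - 2 points.
--         total = 0
--         for j in range(len(line) - 4):
--             b = line[j]
--             if line[j + 1] == b and line[j + 2] == b and line[j + 3] == b and line[j + 4] == b: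
--                 total += 3 if j == 0 or line[j - 1] != b else 1
--         return total
--
--     score = 0
--     for i in range(n):
--         score += window_penalty(matrix[i][:n])
--     for j in range(n):
--         score += window_penalty([matrix[i][j] for i in range(n)])
--     return score
-- ===== Notes on version B (the rewrite author's own statement) =====
-- stated objective: alternative
-- what changed: Replaces A's stateful run-length scan (prev-bit/counter pairs with end-of-line flushes) by a stateless sliding-window count: each all-equal window of 5 modules scores 1 point, plus 2 extra when the window starts a run, since a run of length L>=5 yields (L-4) windows one of which is run-starting, totalling L-2.
import Mathlib
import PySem

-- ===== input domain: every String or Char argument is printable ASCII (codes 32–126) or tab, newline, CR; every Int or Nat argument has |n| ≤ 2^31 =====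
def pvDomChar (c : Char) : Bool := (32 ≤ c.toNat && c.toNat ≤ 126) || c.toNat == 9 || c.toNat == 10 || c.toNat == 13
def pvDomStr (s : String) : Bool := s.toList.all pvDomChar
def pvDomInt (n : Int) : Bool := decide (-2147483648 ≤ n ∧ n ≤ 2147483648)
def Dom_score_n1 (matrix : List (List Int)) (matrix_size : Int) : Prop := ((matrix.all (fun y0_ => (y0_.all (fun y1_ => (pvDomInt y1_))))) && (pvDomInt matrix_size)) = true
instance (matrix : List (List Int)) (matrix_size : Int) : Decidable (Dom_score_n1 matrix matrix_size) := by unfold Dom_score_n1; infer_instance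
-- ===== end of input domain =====

-- B replaces A's stateful run-length scan (prev-bit/counter state with end-of-line flushes) by a
-- stateless sliding-window count: 1 point per all-equal window of 5 modules, plus 2 when the window
-- starts a run (a run of length L>=5 has L-4 windows, one of them run-starting: (L-4)+2 = L-2).


-- ===== PORT A =====
-- literal transliteration of A: one pass over i, fused inner pass over j updating
-- (score, prev_bit_row, row_counter, prev_bit_col, col_counter), then the two flushes.
-- pyGetD's defaults are reachable only outside Pre_ (where Python raises IndexError).
def score_n1 (matrix : List (List Int)) (matrix_size : Int) : Int :=
  (PySem.List.pyRange 0 matrix_size 1).foldl (fun score i =>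
    match
      (PySem.List.pyRange 0 matrix_size 1).foldl (fun (st : Int × Int × Int × Int × Int) j =>
        match st with
        | (score, pr, rc, pc, cc) =>
          let r : Int × Int × Int :=
            if PySem.List.pyGetD (PySem.List.pyGetD matrix i []) j 0 = pr then (score, pr, rc + 1)
            else ((if 5 ≤ rc then score + rc - 2 else score),
                  PySem.List.pyGetD (PySem.List.pyGetD matrix i []) j 0, 1)
          let c : Int × Int × Int :=
            if PySem.List.pyGetD (PySem.List.pyGetD matrix j []) i 0 = pc then (r.1, pc, cc + 1)
            else ((if 5 ≤ cc then r.1 + cc - 2 else r.1),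
                  PySem.List.pyGetD (PySem.List.pyGetD matrix j []) i 0, 1)
          (c.1, r.2.1, r.2.2, c.2.1, c.2.2))
        (score, -1, 0, -1, 0)
    with
    | (score, _, rc, _, cc) =>
      let score := if 5 ≤ rc then score + rc - 2 else score
      if 5 ≤ cc then score + cc - 2 else score)
    0

-- ===== PORT B =====
-- B's helper: for j in range(len(line)-4), score the window line[j..j+4] — 3 points when it
-- is all-equal and starts a run (j == 0 or line[j-1] != line[j]), 1 when all-equal inside a run.
def windowPenalty (line : List Int) : Int :=
  (PySem.List.pyRange 0 ((line.length : Int) - 4) 1).foldl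
    (fun total j =>
      let b := PySem.List.pyGetD line j 0
      if PySem.List.pyGetD line (j + 1) 0 = b ∧ PySem.List.pyGetD line (j + 2) 0 = b ∧
         PySem.List.pyGetD line (j + 3) 0 = b ∧ PySem.List.pyGetD line (j + 4) 0 = b then
        total + (if j = 0 ∨ PySem.List.pyGetD line (j - 1) 0 ≠ b then 3 else 1)
      else total)
    0

-- B: row pass over matrix[i][:n], then column pass over [matrix[i][j] for i in range(n)]
def score_n1_alt (matrix : List (List Int)) (matrix_size : Int) : Int :=
  let n := matrix_size
  let s1 := (PySem.List.pyRange 0 n 1).foldl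
    (fun score i =>
      score + windowPenalty (PySem.List.slice (PySem.List.pyGetD matrix i []) none (some n))) 0
  (PySem.List.pyRange 0 n 1).foldl
    (fun score j =>
      score + windowPenalty ((PySem.List.pyRange 0 n 1).map
        (fun i => PySem.List.pyGetD (PySem.List.pyGetD matrix i []) j 0))) s1

-- ===== PRECONDITION & SPEC =====
-- Pre_: exactly the inputs where Python A returns: the first matrix_size rows exist and each
-- of them has at least matrix_size entries (otherwise matrix[i][j] raises IndexError).
def Pre_score_n1 (matrix : List (List Int)) (matrix_size : Int) : Prop :=
  matrix_size ≤ (matrix.length : Int) ∧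
  ∀ row ∈ matrix.take matrix_size.toNat, matrix_size ≤ (row.length : Int)
instance (matrix : List (List Int)) (matrix_size : Int) : Decidable (Pre_score_n1 matrix matrix_size) := by
  unfold Pre_score_n1; infer_instance

def pvWitness_score_n1 : List (List Int) × Int :=
  ([[1, 1, 1, 1, 1, 0], [0, 1, 0, 1, 0, 1], [1, 0, 1, 0, 1, 0], [0, 1, 0, 1, 0, 1],
    [1, 0, 1, 0, 1, 0], [0, 1, 0, 1, 0, 1]], 6)

def Spec_score_n1 (matrix : List (List Int)) (matrix_size : Int) (out : Int) : Prop := out = score_n1_alt matrix matrix_size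
instance (matrix : List (List Int)) (matrix_size : Int) (out : Int) : Decidable (Spec_score_n1 matrix matrix_size out) := by unfold Spec_score_n1; infer_instance

-- ===== CLAIM (what is proved, stated in full; the proofs are below) =====
def Claim_equal_score_n1 : Prop := ∀ (matrix : List (List Int)) (matrix_size : Int), Dom_score_n1 matrix matrix_size → Pre_score_n1 matrix matrix_size → Spec_score_n1 matrix matrix_size (score_n1 matrix matrix_size)

-- ===== LEMMAS AND PROOFS =====

-- proof-side single-line scanner in A's (score, prev, counter) representation
def rstep (t : Int × Int × Int) (b : Int) : Int × Int × Int :=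
  if b = t.2.1 then (t.1, t.2.1, t.2.2 + 1)
  else ((if 5 ≤ t.2.2 then t.1 + t.2.2 - 2 else t.1), b, 1)

-- the penalty A's scan assigns to one full line
def penA (xs : List Int) : Int :=
  let t := xs.foldl rstep (0, -1, 0)
  if 5 ≤ t.2.2 then t.1 + t.2.2 - 2 else t.1

-- A's pending flush for a counter value
def fpen (c : Int) : Int := if 5 ≤ c then c - 2 else 0

-- proof-side eager scanner: same (prev, cnt) state as rstep, but the score is credited
-- as the trailing run grows (3 when the run reaches 5, 1 for each further module) — no flush.
def wstep (t : Int × Int × Int) (b : Int) : Int × Int × Int :=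
  if b = t.2.1 then
    (t.1 + (if t.2.2 + 1 = 5 then 3 else if 5 < t.2.2 + 1 then 1 else 0), t.2.1, t.2.2 + 1)
  else (t.1, b, 1)

-- window contribution at start index j, over plain Nat indexing
def contribAt (xs : List Int) (j : Nat) : Int :=
  if xs.getD (j + 1) 0 = xs.getD j 0 ∧ xs.getD (j + 2) 0 = xs.getD j 0 ∧
     xs.getD (j + 3) 0 = xs.getD j 0 ∧ xs.getD (j + 4) 0 = xs.getD j 0 then
    (if j = 0 ∨ xs.getD (j - 1) 0 ≠ xs.getD j 0 then 3 else 1)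
  else 0

-- total window score of a line
def W (xs : List Int) : Int := ((List.range (xs.length - 4)).map (contribAt xs)).sum

lemma foldl_rstep_shift (xs : List Int) (d : Int) : ∀ (s p c : Int),
    xs.foldl rstep (s + d, p, c)
      = ((xs.foldl rstep (s, p, c)).1 + d, (xs.foldl rstep (s, p, c)).2) := by
  induction xs with
  | nil => intro s p c; simp
  | cons b bs ih =>
    intro s p c
    simp only [List.foldl_cons, rstep]
    split_ifs with h1 h2
    · exact ih s p (c + 1)
    · rw [show s + d + c - 2 = (s + c - 2) + d by ring]; exact ih (s + c - 2) b 1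
    · exact ih s b 1

lemma foldl_rstep_base (xs : List Int) (s p c : Int) :
    xs.foldl rstep (s, p, c) = ((xs.foldl rstep (0, p, c)).1 + s, (xs.foldl rstep (0, p, c)).2) := by
  have h := foldl_rstep_shift xs s 0 p c
  simpa using h

-- A's fused inner loop splits into two independent line scans that share the score additively
lemma fused_split (fR fC : Int → Int) (js : List Int) : ∀ (s pr rc pc cc : Int),
    js.foldl (fun (st : Int × Int × Int × Int × Int) j =>
        match st with
        | (score, pr, rc, pc, cc) =>
          let r : Int × Int × Int :=
            if fR j = pr then (score, pr, rc + 1)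
            else ((if 5 ≤ rc then score + rc - 2 else score), fR j, 1)
          let c : Int × Int × Int :=
            if fC j = pc then (r.1, pc, cc + 1)
            else ((if 5 ≤ cc then r.1 + cc - 2 else r.1), fC j, 1)
          (c.1, r.2.1, r.2.2, c.2.1, c.2.2))
      (s, pr, rc, pc, cc)
    = (s + ((js.map fR).foldl rstep (0, pr, rc)).1 + ((js.map fC).foldl rstep (0, pc, cc)).1,
       ((js.map fR).foldl rstep (0, pr, rc)).2.1, ((js.map fR).foldl rstep (0, pr, rc)).2.2,
       ((js.map fC).foldl rstep (0, pc, cc)).2.1, ((js.map fC).foldl rstep (0, pc, cc)).2.2) := by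
  induction js with
  | nil => intro s pr rc pc cc; simp
  | cons j js ih =>
    intro s pr rc pc cc
    simp only [List.foldl_cons, List.map_cons, rstep]
    split_ifs with h1 h2 h3 h4 h5 h6 h7 h8
    all_goals rw [ih]
    all_goals try rw [foldl_rstep_base (List.map fR js) (0 + rc - 2) (fR j) 1]
    all_goals try rw [foldl_rstep_base (List.map fC js) (0 + cc - 2) (fC j) 1]
    all_goals (simp only [Prod.ext_iff]; norm_num)
    all_goals ring

-- the eager scanner carries A's pending flush inside its score
lemma rw_rel (xs : List Int) : ∀ (s t p c : Int), t = s + fpen c →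
    xs.foldl wstep (t, p, c)
      = ((xs.foldl rstep (s, p, c)).1 + fpen (xs.foldl rstep (s, p, c)).2.2,
         (xs.foldl rstep (s, p, c)).2) := by
  induction xs with
  | nil =>
    intro s t p c ht
    simp only [List.foldl_nil, fpen] at *
    split_ifs at ht ⊢ <;> simp_all
  | cons b bs ih =>
    intro s t p c ht
    simp only [List.foldl_cons, rstep, wstep]
    by_cases h1 : b = p
    · simp only [if_pos h1]
      refine ih s _ p (c + 1) ?_
      unfold fpen at ht ⊢
      split_ifs at ht ⊢ <;> omega
    · simp only [if_neg h1]
      refine ih (if 5 ≤ c then s + c - 2 else s) t b 1 ?_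
      unfold fpen at ht ⊢
      split_ifs at ht ⊢ <;> omega

lemma penA_eq_wfold (xs : List Int) : penA xs = (xs.foldl wstep (0, -1, 0)).1 := by
  rw [rw_rel xs 0 0 (-1) 0 (by simp [fpen])]
  unfold penA fpen
  split_ifs <;> simp <;> omega

-- the eager scanner computes the window score; (p, m) is the trailing run (value, length)
lemma contribAt_append (l : List Int) (x : Int) (j : Nat) (h : j + 4 < l.length) :
    contribAt (l ++ [x]) j = contribAt l j := by
  unfold contribAt
  rw [List.getD_append _ _ _ _ (by omega : j < l.length),
      List.getD_append _ _ _ _ (by omega : j + 1 < l.length),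
      List.getD_append _ _ _ _ (by omega : j + 2 < l.length),
      List.getD_append _ _ _ _ (by omega : j + 3 < l.length),
      List.getD_append _ _ _ _ (by omega : j + 4 < l.length),
      List.getD_append _ _ _ _ (by omega : j - 1 < l.length)]

lemma W_append (l : List Int) (x : Int) :
    W (l ++ [x]) = W l + (if 4 ≤ l.length then contribAt (l ++ [x]) (l.length - 4) else 0) := by
  by_cases h4 : 4 ≤ l.length
  · unfold W
    have hlen : (l ++ [x]).length - 4 = (l.length - 4) + 1 := by simp; omega
    rw [hlen, List.range_succ, List.map_append, List.sum_append, if_pos h4]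
    simp only [List.map_cons, List.map_nil, List.sum_cons, List.sum_nil, add_zero]
    congr 1
    apply congrArg List.sum
    apply List.map_congr_left
    intro j hj
    exact contribAt_append l x j (by simp only [List.mem_range] at hj; omega)
  · unfold W
    have h1 : (l ++ [x]).length - 4 = 0 := by simp; omega
    have h2 : l.length - 4 = 0 := by omega
    rw [h1, h2, if_neg h4]
    simp

lemma wfold_spec (xs : List Int) : ∃ (p : Int) (m : Nat),
    xs.foldl wstep (0, -1, 0) = (W xs, p, (m : Int)) ∧ m ≤ xs.length ∧
    (xs ≠ [] → 1 ≤ m) ∧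
    (∀ k, k < m → xs.getD (xs.length - 1 - k) 0 = p) ∧
    (m < xs.length → xs.getD (xs.length - 1 - m) 0 ≠ p) := by
  induction xs using List.reverseRecOn with
  | nil =>
    refine ⟨-1, 0, ?_, by simp, by simp, by omega, by simp⟩
    simp [W]
  | append_singleton l x ih =>
    obtain ⟨p, m, heq, hm, hne1, htr, hbd⟩ := ih
    have hysl : ∀ i, i < l.length → (l ++ [x]).getD i 0 = l.getD i 0 :=
      fun i hi => List.getD_append _ _ _ _ hi
    have hysx : (l ++ [x]).getD l.length 0 = x := by
      rw [List.getD_append_right _ _ _ _ (le_refl _)]; simp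
    have hlen : (l ++ [x]).length = l.length + 1 := by simp
    rw [List.foldl_append, heq]
    simp only [List.foldl_cons, List.foldl_nil, wstep]
    by_cases hx : x = p
    · rw [if_pos hx]
      refine ⟨p, m + 1, ?_, by omega, fun _ => by omega, ?_, ?_⟩
      · -- value equation
        have hW : W (l ++ [x]) = W l + (if (m : Int) + 1 = 5 then 3 else if 5 < (m : Int) + 1 then 1 else 0) := by
          rw [W_append]
          congr 1
          by_cases h4 : 4 ≤ l.length
          · rw [if_pos h4]
            by_cases hm4 : 4 ≤ m
            · -- trailing run covers the whole window
              have hall : ∀ t, t ≤ 4 → (l ++ [x]).getD (l.length - 4 + t) 0 = p := by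
                intro t ht
                rcases Nat.lt_or_ge (l.length - 4 + t) l.length with hlt | hge
                · rw [hysl _ hlt]
                  have he : l.length - 4 + t = l.length - 1 - (3 - t) := by omega
                  rw [he]
                  exact htr (3 - t) (by omega)
                · have he : l.length - 4 + t = l.length := by omega
                  rw [he, hysx]; exact hx
              have h0 : (l ++ [x]).getD (l.length - 4) 0 = p := by
                have := hall 0 (by omega); simpa using this
              have hc : (l ++ [x]).getD (l.length - 4 + 1) 0 = (l ++ [x]).getD (l.length - 4) 0 ∧
                  (l ++ [x]).getD (l.length - 4 + 2) 0 = (l ++ [x]).getD (l.length - 4) 0 ∧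
                  (l ++ [x]).getD (l.length - 4 + 3) 0 = (l ++ [x]).getD (l.length - 4) 0 ∧
                  (l ++ [x]).getD (l.length - 4 + 4) 0 = (l ++ [x]).getD (l.length - 4) 0 := by
                rw [h0, hall 1 (by omega), hall 2 (by omega), hall 3 (by omega), hall 4 (by omega)]
                exact ⟨rfl, rfl, rfl, rfl⟩
              unfold contribAt
              rw [if_pos hc]
              by_cases hm5 : m = 4
              · rw [if_pos (by omega : (m : Int) + 1 = 5)]
                rw [if_pos ?_]
                by_cases hn4 : l.length = 4
                · exact Or.inl (by omega)
                · refine Or.inr ?_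
                  have hmn : m < l.length := by omega
                  have hb := hbd hmn
                  rw [hysl _ (by omega : l.length - 4 - 1 < l.length)]
                  rw [show l.length - 4 - 1 = l.length - 1 - m from by omega, h0]
                  exact hb
              · rw [if_neg (by omega : ¬ ((m : Int) + 1 = 5)),
                    if_pos (by omega : (5 : Int) < (m : Int) + 1)]
                rw [if_neg ?_]
                rw [not_or, not_ne_iff]
                refine ⟨by omega, ?_⟩
                rw [h0, hysl _ (by omega : l.length - 4 - 1 < l.length),
                    show l.length - 4 - 1 = l.length - 1 - 4 from by omega]
                exact htr 4 (by omega)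
            · -- short trailing run: the new window is not all-equal
              rw [if_neg (by omega : ¬ ((m : Int) + 1 = 5)),
                  if_neg (by omega : ¬ ((5 : Int) < (m : Int) + 1))]
              unfold contribAt
              rw [if_neg ?_]
              rintro ⟨c1, c2, c3, c4⟩
              have hmn : m < l.length := by omega
              have hb := hbd hmn
              have hx4 : (l ++ [x]).getD (l.length - 4 + 4) 0 = x := by
                rw [show l.length - 4 + 4 = l.length from by omega, hysx]
              have hj : (l ++ [x]).getD (l.length - 4) 0 = p := by
                rw [← hx]; rw [hx4] at c4; exact c4.symm
              have hcontra : (l ++ [x]).getD (l.length - 1 - m) 0 = p := by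
                interval_cases m
                · rw [show l.length - 1 - 0 = l.length - 4 + 3 from by omega, c3, hj]
                · rw [show l.length - 1 - 1 = l.length - 4 + 2 from by omega, c2, hj]
                · rw [show l.length - 1 - 2 = l.length - 4 + 1 from by omega, c1, hj]
                · rw [show l.length - 1 - 3 = l.length - 4 from by omega, hj]
              rw [hysl _ (by omega : l.length - 1 - m < l.length)] at hcontra
              exact hb hcontra
          · rw [if_neg h4]
            have : m ≤ 3 := by omega
            rw [if_neg (by omega : ¬ ((m : Int) + 1 = 5)),
                if_neg (by omega : ¬ ((5 : Int) < (m : Int) + 1))]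
        rw [hW]
        norm_cast
      · intro k hk
        rw [show (l ++ [x]).length - 1 - k = l.length - k from by simp]
        rcases Nat.eq_zero_or_pos k with hk0 | hk1
        · subst hk0
          simpa [hysx] using hx
        · rw [hysl _ (by omega : l.length - k < l.length),
              show l.length - k = l.length - 1 - (k - 1) from by omega]
          exact htr (k - 1) (by omega)
      · intro h
        have hmn : m < l.length := by rw [hlen] at h; omega
        rw [show (l ++ [x]).length - 1 - (m + 1) = l.length - 1 - m from by simp; omega,
            hysl _ (by omega : l.length - 1 - m < l.length)]
        exact hbd hmn
    · rw [if_neg hx]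
      refine ⟨x, 1, ?_, by omega, fun _ => le_refl 1, ?_, ?_⟩
      · -- value equation: the new window (if any) is not all-equal
        have hW : W (l ++ [x]) = W l := by
          rw [W_append]
          by_cases h4 : 4 ≤ l.length
          · rw [if_pos h4]
            have hz : contribAt (l ++ [x]) (l.length - 4) = 0 := by
              unfold contribAt
              rw [if_neg ?_]
              rintro ⟨c1, c2, c3, c4⟩
              have hx4 : (l ++ [x]).getD (l.length - 4 + 4) 0 = x := by
                rw [show l.length - 4 + 4 = l.length from by omega, hysx]
              have hp3 : (l ++ [x]).getD (l.length - 4 + 3) 0 = p := by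
                rw [show l.length - 4 + 3 = l.length - 1 - 0 from by omega,
                    hysl _ (by omega : l.length - 1 - 0 < l.length)]
                exact htr 0 (hne1 (by intro hnil; rw [hnil] at h4; simp at h4))
              rw [hx4] at c4
              rw [hp3] at c3
              exact hx (c4.trans c3.symm)
            rw [hz, add_zero]
          · rw [if_neg h4, add_zero]
        rw [hW]
        norm_cast
      · intro k hk
        have hk0 : k = 0 := by omega
        subst hk0
        rw [show (l ++ [x]).length - 1 - 0 = l.length from by simp]
        exact hysx
      · intro h
        have hl : l ≠ [] := by
          intro hnil; rw [hnil] at h; simp at h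
        rw [show (l ++ [x]).length - 1 - 1 = l.length - 1 from by simp,
            hysl _ (by have := List.length_pos_iff.mpr hl; omega : l.length - 1 < l.length),
            show l.length - 1 = l.length - 1 - 0 from by omega]
        rw [htr 0 (hne1 hl)]
        exact fun hpe => hx hpe.symm


-- B's window loop over Python indices is the Nat-indexed window sum
lemma contribAt_cast (line : List Int) (j : Nat) (total : Int) :
    (let b := PySem.List.pyGetD line (0 + (j : Int)) 0
      if PySem.List.pyGetD line (0 + (j : Int) + 1) 0 = b ∧ PySem.List.pyGetD line (0 + (j : Int) + 2) 0 = b ∧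
         PySem.List.pyGetD line (0 + (j : Int) + 3) 0 = b ∧ PySem.List.pyGetD line (0 + (j : Int) + 4) 0 = b then
        total + (if 0 + (j : Int) = 0 ∨ PySem.List.pyGetD line (0 + (j : Int) - 1) 0 ≠ b then 3 else 1)
      else total)
    = total + contribAt line j := by
  have e1 : (j : Int) + 1 = ((j + 1 : Nat) : Int) := by push_cast; ring
  have e2 : (j : Int) + 2 = ((j + 2 : Nat) : Int) := by push_cast; ring
  have e3 : (j : Int) + 3 = ((j + 3 : Nat) : Int) := by push_cast; ring
  have e4 : (j : Int) + 4 = ((j + 4 : Nat) : Int) := by push_cast; ring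
  simp only [zero_add, e1, e2, e3, e4, PySem.List.pyGetD_natCast, contribAt]
  by_cases hj : j = 0
  · subst hj
    simp only [Nat.cast_zero, true_or, if_true]
    split_ifs <;> ring
  · have e5 : (j : Int) - 1 = ((j - 1 : Nat) : Int) := by omega
    have e6 : ¬ ((j : Int) = 0) := by exact_mod_cast hj
    simp only [e5, PySem.List.pyGetD_natCast, e6, false_or, hj]
    split_ifs <;> ring

lemma windowPenalty_eq_W (line : List Int) : windowPenalty line = W line := by
  unfold windowPenalty W
  rw [PySem.List.pyRange_one]
  have hM : (((line.length : Int) - 4) - 0).toNat = line.length - 4 := by omega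
  rw [hM, List.foldl_map]
  refine Eq.trans
    (PySem.List.foldl_congr_mem _ _ (fun total (j : Nat) => total + contribAt line j) _
      (fun total j _ => contribAt_cast line j total)) ?_
  rw [PySem.List.foldl_add]
  simp

lemma windowPenalty_eq_penA (xs : List Int) : windowPenalty xs = penA xs := by
  obtain ⟨p, m, heq, -, -, -, -⟩ := wfold_spec xs
  rw [windowPenalty_eq_W, penA_eq_wfold, heq]

-- reading a line entry by entry through range(n) is take n
lemma take_eq_map_pyRange (row : List Int) (m : Nat) (h : m ≤ row.length) :
    (PySem.List.pyRange 0 (m : Int) 1).map (fun j => PySem.List.pyGetD row j 0) = row.take m := by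
  apply List.ext_getElem
  · simp [PySem.List.length_pyRange_one]; omega
  · intro k hk hk2
    simp only [List.getElem_map, PySem.List.getElem_pyRange_one, zero_add,
      PySem.List.pyGetD_natCast, List.getElem_take]
    have hk' : k < m := by simpa [PySem.List.length_pyRange_one] using hk
    rw [List.getD_eq_getElem _ _ (by omega)]

-- A as a sum of per-line penalties
lemma scoreA_eq (matrix : List (List Int)) (n : Int) :
    score_n1 matrix n = 0 + ((PySem.List.pyRange 0 n 1).map (fun i =>
      penA ((PySem.List.pyRange 0 n 1).map
        (fun j => PySem.List.pyGetD (PySem.List.pyGetD matrix i []) j 0))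
      + penA ((PySem.List.pyRange 0 n 1).map
        (fun j => PySem.List.pyGetD (PySem.List.pyGetD matrix j []) i 0)))).sum := by
  unfold score_n1
  rw [← PySem.List.foldl_add]
  apply PySem.List.foldl_congr_mem
  intro score i _
  have h := fused_split (fun j => PySem.List.pyGetD (PySem.List.pyGetD matrix i []) j 0)
    (fun j => PySem.List.pyGetD (PySem.List.pyGetD matrix j []) i 0)
    (PySem.List.pyRange 0 n 1) score (-1) 0 (-1) 0
  beta_reduce at h
  rw [h]
  simp only [penA]
  split_ifs <;> ring

-- B as the same two sums
lemma scoreB_eq (matrix : List (List Int)) (n : Int) :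
    score_n1_alt matrix n =
      ((PySem.List.pyRange 0 n 1).map (fun i =>
        windowPenalty (PySem.List.slice (PySem.List.pyGetD matrix i []) none (some n)))).sum
      + ((PySem.List.pyRange 0 n 1).map (fun i =>
        windowPenalty ((PySem.List.pyRange 0 n 1).map
          (fun j => PySem.List.pyGetD (PySem.List.pyGetD matrix j []) i 0)))).sum := by
  unfold score_n1_alt
  rw [PySem.List.foldl_add, PySem.List.foldl_add]
  simp

-- ===== VERDICT (by name: the statement is the Claim_ definition above) =====
theorem score_n1_spec : Claim_equal_score_n1 := by
  intro matrix n _hdom hpre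
  obtain ⟨hlen, hrows⟩ := hpre
  unfold Spec_score_n1
  rw [scoreA_eq, scoreB_eq, zero_add, PySem.List.sum_map_add_int]
  congr 1
  · apply congrArg List.sum
    apply List.map_congr_left
    intro i hi
    obtain ⟨h0, h1⟩ := PySem.List.mem_pyRange_one.mp hi
    have hn0 : (0 : Int) ≤ n := le_trans h0 (le_of_lt h1)
    have hil : i < (matrix.length : Int) := lt_of_lt_of_le h1 hlen
    have hrowmem : PySem.List.pyGetD matrix i [] ∈ matrix.take n.toNat := by
      rw [PySem.List.pyGetD_eq_getElem matrix [] h0 hil]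
      have hlt : i.toNat < (matrix.take n.toNat).length := by
        simp only [List.length_take]
        omega
      exact List.getElem_take (h := hlt) ▸ List.getElem_mem hlt
    have hlenrow := hrows _ hrowmem
    have hmle : n.toNat ≤ (PySem.List.pyGetD matrix i []).length := by omega
    rw [windowPenalty_eq_penA, PySem.List.slice_to _ hn0]
    rw [show n = ((n.toNat : Nat) : Int) from (Int.toNat_of_nonneg hn0).symm]
    simp only [Int.toNat_natCast]
    exact congrArg penA (take_eq_map_pyRange _ _ hmle)
  · apply congrArg List.sum
    apply List.map_congr_left
    intro i _
    rw [windowPenalty_eq_penA]
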